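-- pv_equiv track=rewrite | github.com/codeBobBot/auto-trade | src/probability_arbitrage_strategy.py | extract_crypto_event_types
-- ===== SOURCE A (Python) =====
-- from typing import Dict, List, Optional, Tuple
--
-- def extract_crypto_event_types(markets: List[Dict]) -> List[str]:
--     """提取加密货币事件类型"""
--     event_type_keywords = {
--         'price_level': ['reach', 'above', 'below', 'level', 'target', '65,000', '70,000', '60,000', '75,000', '80,000', '50,000', '100k', '150k', '200k', '5k', '10k', '3k', '8k', '4k', '6k', '2k'],
--         'price_direction': ['up', 'down', 'rise', 'fall', 'direction', 'trend', 'bullish', 'bearish'],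
--         'volatility': ['volatile', 'volatility', 'swing', 'fluctuation', 'range', 'choppy', 'stable'],
--         'regulatory': ['regulation', 'etf', 'sec', 'approval', 'ban', 'legal', 'policy'],
--         'adoption': ['adoption', 'institutional', 'mainstream', 'integration', 'payment', 'acceptance']
--     }
--
--     market_event_types = []
--     for market in markets:
--         question = market.get('question', '').lower()
--         detected_types = []
--
--         for event_type, keywords in event_type_keywords.items():
--             if any(keyword in question for keyword in keywords):
--                 detected_types.append(event_type)
--
--         # 如果没有检测到特定类型，默认为unknown
--         if not detected_types:
--             detected_types.append('unknown')
--
--         market_event_types.extend(detected_types)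
--
--     return list(set(market_event_types))
-- ===== SOURCE B (Python) =====
-- def extract_crypto_event_types(markets):
--     """提取加密货币事件类型 (type-major union; deterministic sorted output)"""
--     table = [
--         ('price_level', ['reach', 'above', 'below', 'level', 'target', '65,000', '70,000', '60,000', '75,000', '80,000', '50,000', '100k', '150k', '200k', '5k', '10k', '3k', '8k', '4k', '6k', '2k']),
--         ('price_direction', ['up', 'down', 'rise', 'fall', 'direction', 'trend', 'bullish', 'bearish']),
--         ('volatility', ['volatile', 'volatility', 'swing', 'fluctuation', 'range', 'choppy', 'stable']),
--         ('regulatory', ['regulation', 'etf', 'sec', 'approval', 'ban', 'legal', 'policy']),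
--         ('adoption', ['adoption', 'institutional', 'mainstream', 'integration', 'payment', 'acceptance']),
--     ]
--     questions = [m.get('question', '').lower() for m in markets]
--     found = [t for t, kws in table
--              if any(kw in q for q in questions for kw in kws)]
--     if any(not any(kw in q for _, kws in table for kw in kws) for q in questions):
--         found.append('unknown')
--     return sorted(found)
-- ===== Notes on version B (the rewrite author's own statement) =====
-- stated objective: alternative
-- what changed: A accumulates per-market detected-type lists (market-major, with a per-market 'unknown' fallback) and dedups via set at the end; B transposes the loops: one type-major pass marks each event type whose keywords hit any question, plus one separate scan adding 'unknown' iff some question matches no keyword at all, returning the union sorted (a deterministic order for the order-unspecified list(set(...)) of A).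
import Mathlib
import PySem

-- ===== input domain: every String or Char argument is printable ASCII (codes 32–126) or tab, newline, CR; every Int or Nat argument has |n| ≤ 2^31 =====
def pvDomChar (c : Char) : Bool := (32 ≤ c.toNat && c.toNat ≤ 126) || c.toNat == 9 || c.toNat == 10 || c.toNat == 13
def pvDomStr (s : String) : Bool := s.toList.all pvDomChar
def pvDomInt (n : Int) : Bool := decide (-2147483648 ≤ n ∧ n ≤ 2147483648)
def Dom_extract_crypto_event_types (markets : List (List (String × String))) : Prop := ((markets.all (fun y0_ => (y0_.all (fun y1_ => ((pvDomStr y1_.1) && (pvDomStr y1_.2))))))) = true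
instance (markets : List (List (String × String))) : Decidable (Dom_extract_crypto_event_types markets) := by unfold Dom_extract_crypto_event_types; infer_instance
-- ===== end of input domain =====

-- B transposes A's market-major accumulation into a type-major union plus one separate
-- 'unknown' scan (alternative decomposition, same cost); Python's list(set(...)) iteration
-- order is unspecified, so both ports canonicalise the returned set in sorted order.

-- The fixed keyword table: the identical literal appears in both Python sources
-- (A's event_type_keywords dict, iterated via .items(); B's table list of pairs).
def pvEventTypeKeywords : List (String × List String) := [
  ("price_level", ["reach", "above", "below", "level", "target", "65,000", "70,000", "60,000", "75,000", "80,000", "50,000", "100k", "150k", "200k", "5k", "10k", "3k", "8k", "4k", "6k", "2k"]),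
  ("price_direction", ["up", "down", "rise", "fall", "direction", "trend", "bullish", "bearish"]),
  ("volatility", ["volatile", "volatility", "swing", "fluctuation", "range", "choppy", "stable"]),
  ("regulatory", ["regulation", "etf", "sec", "approval", "ban", "legal", "policy"]),
  ("adoption", ["adoption", "institutional", "mainstream", "integration", "payment", "acceptance"])]

-- market.get('question', '').lower() — the same expression occurs in both sources
def pvQuestion (m : List (String × String)) : String :=
  PySem.Str.lower (PySem.Dict.getD (PySem.Dict.mk m) "question" "")

-- ===== PORT A =====
def extract_crypto_event_types (markets : List (List (String × String))) : List String :=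
  let met := markets.foldl (fun acc market =>
    let question := pvQuestion market
    let detected := pvEventTypeKeywords.foldl (fun dt p =>
      if p.2.any (fun kw => PySem.Str.isIn kw question) then dt ++ [p.1] else dt) ([] : List String)
    let detected := if detected = [] then detected ++ ["unknown"] else detected
    acc ++ detected) []
  -- list(set(met)): Python's set iteration order is unspecified (hash order, not modelled;
  -- outputs are compared as sets) — the port lists the distinct elements in sorted order.
  PySem.List.sorted (PySem.Set.ofList met) (fun x => x) false

-- ===== PORT B =====
def extract_crypto_event_types_alt (markets : List (List (String × String))) : List String :=
  let questions := markets.map (fun m => pvQuestion m)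
  let found := (pvEventTypeKeywords.filter (fun p =>
      questions.any (fun q => p.2.any (fun kw => PySem.Str.isIn kw q)))).map (fun p => p.1)
  let found := if questions.any (fun q =>
      !(pvEventTypeKeywords.any (fun p => p.2.any (fun kw => PySem.Str.isIn kw q))))
    then found ++ ["unknown"] else found
  PySem.List.sorted found (fun x => x) false

-- ===== PRECONDITION & SPEC =====
def Spec_extract_crypto_event_types (markets : List (List (String × String))) (out : List String) : Prop := out = extract_crypto_event_types_alt markets
instance (markets : List (List (String × String))) (out : List String) : Decidable (Spec_extract_crypto_event_types markets out) := by unfold Spec_extract_crypto_event_types; infer_instance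

-- ===== CLAIM (what is proved, stated in full; the proofs are below) =====
def Claim_equal_extract_crypto_event_types : Prop := ∀ (markets : List (List (String × String))), Dom_extract_crypto_event_types markets → Spec_extract_crypto_event_types markets (extract_crypto_event_types markets)

-- ===== LEMMAS AND PROOFS =====

-- per-market tag list produced by A's inner loop (filter/map form)
def pvTags (market : List (String × String)) : List String :=
  let q := pvQuestion market
  let d := (pvEventTypeKeywords.filter (fun p => p.2.any (fun kw => PySem.Str.isIn kw q))).map (fun p => p.1)
  if d = [] then ["unknown"] else d

def pvHit (m : List (String × String)) (p : String × List String) : Bool :=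
  p.2.any (fun kw => PySem.Str.isIn kw (pvQuestion m))

theorem pv_a_flatMap (markets : List (List (String × String))) :
    extract_crypto_event_types markets
      = PySem.List.sorted (PySem.Set.ofList (markets.flatMap pvTags)) (fun x => x) false := by
  simp only [extract_crypto_event_types]
  have hbody : (fun (acc : List String) market =>
      let question := pvQuestion market
      let detected := pvEventTypeKeywords.foldl (fun dt p =>
        if p.2.any (fun kw => PySem.Str.isIn kw question) then dt ++ [p.1] else dt) ([] : List String)
      let detected := if detected = [] then detected ++ ["unknown"] else detected
      acc ++ detected)
      = (fun (acc : List String) market => acc ++ pvTags market) := by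
    funext acc m
    simp only [pvTags, PySem.List.foldl_append_if, List.nil_append]
    split
    · rename_i h
      rw [h]
      simp
    · rfl
  rw [hbody, PySem.List.foldl_append_eq_flatMap, List.nil_append]

theorem mem_pvTags (m : List (String × String)) (x : String) :
    x ∈ pvTags m ↔
      (∃ p ∈ pvEventTypeKeywords, pvHit m p ∧ x = p.1) ∨
      (x = "unknown" ∧ ∀ p ∈ pvEventTypeKeywords, ¬ pvHit m p) := by
  simp only [pvTags, pvHit]
  by_cases h : ((pvEventTypeKeywords.filter (fun p => p.2.any (fun kw => PySem.Str.isIn kw (pvQuestion m)))).map (fun p => p.1)) = []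
  · rw [if_pos h]
    rw [List.map_eq_nil_iff, List.filter_eq_nil_iff] at h
    simp only [List.mem_singleton]
    constructor
    · intro hx; exact Or.inr ⟨hx, by simpa using h⟩
    · rintro (⟨p, hp, hhit, rfl⟩ | ⟨rfl, _⟩)
      · exact absurd hhit (by simpa using h p hp)
      · rfl
  · rw [if_neg h]
    constructor
    · intro hx
      rcases List.mem_map.1 hx with ⟨p, hp, rfl⟩
      rcases List.mem_filter.1 hp with ⟨hp1, hp2⟩
      exact Or.inl ⟨p, hp1, hp2, rfl⟩
    · rintro (⟨p, hp, hhit, rfl⟩ | ⟨rfl, hnone⟩)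
      · exact List.mem_map.2 ⟨p, List.mem_filter.2 ⟨hp, hhit⟩, rfl⟩
      · exfalso
        apply h
        rw [List.map_eq_nil_iff, List.filter_eq_nil_iff]
        intro p hp
        simpa using hnone p hp

theorem pv_table_fst_nodup : (pvEventTypeKeywords.map (fun p => p.1)).Nodup := by decide

theorem pv_unknown_not_fst : "unknown" ∉ pvEventTypeKeywords.map (fun p => p.1) := by decide

theorem pv_main (markets : List (List (String × String))) :
    extract_crypto_event_types markets = extract_crypto_event_types_alt markets := by
  rw [pv_a_flatMap]
  simp only [extract_crypto_event_types_alt]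
  apply PySem.List.sorted_eq_sorted_of_perm _ _ _ (fun a b h => h)
  set qs := markets.map (fun m => pvQuestion m) with hqs
  set foundBase := ((pvEventTypeKeywords.filter (fun p =>
      qs.any (fun q => p.2.any (fun kw => PySem.Str.isIn kw q)))).map (fun p => p.1)) with hfb
  set cond := qs.any (fun q =>
      !(pvEventTypeKeywords.any (fun p => p.2.any (fun kw => PySem.Str.isIn kw q)))) with hcond
  have hsub : ∀ x ∈ foundBase, x ∈ pvEventTypeKeywords.map (fun p => p.1) := by
    intro x hx
    rcases List.mem_map.1 hx with ⟨p, hp, rfl⟩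
    exact List.mem_map.2 ⟨p, (List.mem_filter.1 hp).1, rfl⟩
  have hsubl : foundBase.Sublist (pvEventTypeKeywords.map (fun p => p.1)) := by
    rw [hfb]
    exact List.Sublist.map (fun p : String × List String => p.1) List.filter_sublist
  have hnodupBase : foundBase.Nodup := pv_table_fst_nodup.sublist hsubl
  have hnodupB : (if cond = true then foundBase ++ ["unknown"] else foundBase).Nodup := by
    split
    · exact hnodupBase.append (List.nodup_singleton _)
        (by intro a ha hb; rw [List.mem_singleton] at hb; subst hb
            exact pv_unknown_not_fst (hsub _ ha))
    · exact hnodupBase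
  refine (List.perm_ext_iff_of_nodup (PySem.Set.nodup_ofList _) hnodupB).2 ?_
  intro x
  rw [PySem.Set.mem_ofList, List.mem_flatMap]
  have hiff : (x ∈ (if cond = true then foundBase ++ ["unknown"] else foundBase)) ↔
      (x ∈ foundBase ∨ (x = "unknown" ∧ cond = true)) := by
    split
    · rename_i h; simp [List.mem_append, h]
    · rename_i h; simp [h]
  rw [hiff]
  constructor
  · rintro ⟨m, hm, hx⟩
    rcases (mem_pvTags m x).1 hx with ⟨p, hp, hhit, rfl⟩ | ⟨rfl, hnone⟩
    · left
      refine List.mem_map.2 ⟨p, List.mem_filter.2 ⟨hp, ?_⟩, rfl⟩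
      simp only [hqs, List.any_eq_true, List.mem_map]
      exact ⟨pvQuestion m, ⟨m, hm, rfl⟩, by simpa [pvHit] using hhit⟩
    · right
      refine ⟨rfl, ?_⟩
      simp only [hcond, hqs, List.any_eq_true, List.mem_map]
      refine ⟨pvQuestion m, ⟨m, hm, rfl⟩, ?_⟩
      simp only [Bool.not_eq_true', List.any_eq_false]
      intro p hp
      simpa [pvHit] using hnone p hp
  · rintro (hx | ⟨rfl, hc⟩)
    · rcases List.mem_map.1 hx with ⟨p, hp, rfl⟩
      rcases List.mem_filter.1 hp with ⟨hp1, hp2⟩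
      simp only [hqs, List.any_eq_true, List.mem_map] at hp2
      rcases hp2 with ⟨q, ⟨m, hm, rfl⟩, hhit⟩
      exact ⟨m, hm, (mem_pvTags m p.1).2 (Or.inl ⟨p, hp1, by simpa [pvHit] using hhit, rfl⟩)⟩
    · simp only [hcond, hqs, List.any_eq_true, List.mem_map] at hc
      rcases hc with ⟨q, ⟨m, hm, rfl⟩, hq⟩
      refine ⟨m, hm, (mem_pvTags m "unknown").2 (Or.inr ⟨rfl, ?_⟩)⟩
      intro p hp
      simp only [Bool.not_eq_true', List.any_eq_false] at hq
      simpa [pvHit] using hq p hp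

-- ===== VERDICT (by name: the statement is the Claim_ definition above) =====
theorem extract_crypto_event_types_spec : Claim_equal_extract_crypto_event_types := by
  intro markets _
  exact pv_main markets
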